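-- pv_equiv track=rewrite | github.com/shampoon/Python_Level2 | hw1/task2.py | first_method
-- ===== SOURCE A (Python) =====
-- def first_method(num_list):
--     for i in range(0, len(num_list)):
--         bigger_count = 0
--         for j in range(0, len(num_list)):
--             if num_list[i] < num_list[j]:
--                 bigger_count += 1
--         if bigger_count == (len(num_list) - 1):
--             return num_list[i]
-- ===== SOURCE B (Python) =====
-- def first_method(num_list):
--     if not num_list:
--         return None
--     m = min(num_list)
--     if num_list.count(m) == 1:
--         return m
--     return None
-- ===== Notes on version B (the rewrite author's own statement) =====
-- stated objective: faster
-- what changed: Replaces A's quadratic all-pairs counting loops with a single linear pass: take min(num_list) and return it iff it occurs exactly once.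
import Mathlib
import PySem

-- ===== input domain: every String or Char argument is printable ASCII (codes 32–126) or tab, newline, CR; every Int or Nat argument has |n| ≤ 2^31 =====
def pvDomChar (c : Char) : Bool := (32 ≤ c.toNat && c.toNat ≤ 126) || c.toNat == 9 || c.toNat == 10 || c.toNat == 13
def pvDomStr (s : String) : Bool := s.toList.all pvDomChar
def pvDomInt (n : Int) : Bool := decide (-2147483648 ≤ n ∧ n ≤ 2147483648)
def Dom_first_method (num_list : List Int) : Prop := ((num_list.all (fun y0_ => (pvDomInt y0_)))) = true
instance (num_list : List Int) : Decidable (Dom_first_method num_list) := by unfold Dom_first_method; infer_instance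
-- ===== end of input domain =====

-- B replaces A's quadratic all-pairs counting with one linear pass: min(num_list) returned iff it occurs exactly once (objective: faster).

-- ===== PORT A =====
def first_method (num_list : List Int) : Option Int :=
  (PySem.List.pyRange 0 (PySem.List.len num_list) 1).findSome? (fun i =>
    let bigger_count : Int :=
      (PySem.List.pyRange 0 (PySem.List.len num_list) 1).foldl
        (fun acc j => if PySem.List.pyGetD num_list i 0 < PySem.List.pyGetD num_list j 0 then acc + 1 else acc) 0
    if bigger_count = PySem.List.len num_list - 1 then some (PySem.List.pyGetD num_list i 0) else none)

-- ===== PORT B =====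
def first_method_alt (num_list : List Int) : Option Int :=
  match PySem.List.min? num_list (fun x => x) with
  | none => none
  | some m => if PySem.List.count num_list m = 1 then some m else none

-- ===== PRECONDITION & SPEC =====
def Spec_first_method (num_list : List Int) (out : Option Int) : Prop := out = first_method_alt num_list
instance (num_list : List Int) (out : Option Int) : Decidable (Spec_first_method num_list out) := by unfold Spec_first_method; infer_instance

-- ===== CLAIM (what is proved, stated in full; the proofs are below) =====
def Claim_equal_first_method : Prop := ∀ (num_list : List Int), Dom_first_method num_list → Spec_first_method num_list (first_method num_list)

-- ===== LEMMAS AND PROOFS =====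

-- A's inner loop over j computes the number of elements strictly greater than v.
theorem pv_inner (l : List Int) (v : Int) :
    (PySem.List.pyRange 0 (PySem.List.len l) 1).foldl
      (fun acc j => if v < PySem.List.pyGetD l j 0 then acc + 1 else acc) (0 : Int)
    = (l.countP (fun x => decide (v < x)) : Int) := by
  have h := PySem.List.foldl_pyRange_zero_pyGetD l 0
      (fun acc x => if v < x then acc + 1 else acc) (0 : Int)
  rw [h]
  have h2 := PySem.List.foldl_count_if (fun x => decide (v < x)) l 0
  simpa using h2

-- strictly-greater count and at-most count split the length
theorem pv_sum (l : List Int) (v : Int) :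
    l.countP (fun x => decide (v < x)) + l.countP (fun x => decide (x ≤ v)) = l.length := by
  have h := List.length_eq_countP_add_countP (p := fun x => decide (v < x)) (l := l)
  have h2 : l.countP (fun a => decide (¬ (decide (v < a)) = true)) = l.countP (fun x => decide (x ≤ v)) := by
    apply List.countP_congr
    intro a _
    simp
  omega

-- With v ∈ l, "n-1 elements are strictly greater than v" says exactly "v is the minimum and occurs once".
theorem pv_char (l : List Int) (v : Int) (hv : v ∈ l) :
    ((l.countP (fun x => decide (v < x)) : Int) = (l.length : Int) - 1) ↔
      ((∀ y ∈ l, v ≤ y) ∧ l.count v = 1) := by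
  have hn : 0 < l.length := List.length_pos_of_mem hv
  have hsum := pv_sum l v
  constructor
  · intro hc
    have hle : l.countP (fun x => decide (x ≤ v)) = 1 := by omega
    have hfilt : (l.filter (fun x => decide (x ≤ v))).length = 1 := by
      rw [← List.countP_eq_length_filter]; exact hle
    have hvmem : v ∈ l.filter (fun x => decide (x ≤ v)) := by
      simp [List.mem_filter, hv]
    obtain ⟨a, ha⟩ := List.length_eq_one_iff.mp hfilt
    rw [ha] at hvmem
    have hav : v = a := List.mem_singleton.mp hvmem
    constructor
    · intro y hy
      by_contra hlt
      push Not at hlt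
      have hyf : y ∈ l.filter (fun x => decide (x ≤ v)) := by
        simp only [List.mem_filter, decide_eq_true_eq]
        exact ⟨hy, by omega⟩
      rw [ha] at hyf
      have : y = a := List.mem_singleton.mp hyf
      omega
    · have h1 : 1 ≤ l.count v := List.one_le_count_iff.mpr hv
      have h2 : l.count v ≤ l.countP (fun x => decide (x ≤ v)) := by
        rw [List.count_eq_countP]
        apply List.countP_mono_left
        intro x _ hbe
        have : x = v := by simpa using hbe
        simp [this]
      omega
  · rintro ⟨hmin, hcount⟩
    have hfc : l.countP (fun x => decide (x ≤ v)) = l.countP (fun x => x == v) := by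
      apply List.countP_congr
      intro x hx
      have := hmin x hx
      simp only [beq_iff_eq, decide_eq_true_eq]
      omega
    rw [← List.count_eq_countP] at hfc
    omega

-- findSome? returns some m when some element succeeds and every success yields m.
theorem pv_findSome?_eq_some {α β : Type} (f : α → Option β) (xs : List α) (m : β)
    (h1 : ∃ x ∈ xs, f x ≠ none) (h2 : ∀ x ∈ xs, ∀ v, f x = some v → v = m) :
    xs.findSome? f = some m := by
  induction xs with
  | nil => obtain ⟨x, hx, -⟩ := h1; simp at hx
  | cons a t ih =>
    cases hfa : f a with
    | some v =>
      have := h2 a (by simp) v hfa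
      simp [List.findSome?, hfa, this]
    | none =>
      simp only [List.findSome?, hfa]
      apply ih
      · obtain ⟨x, hx, hne⟩ := h1
        rcases List.mem_cons.mp hx with h | h
        · exact absurd hfa (h ▸ hne)
        · exact ⟨x, h, hne⟩
      · intro x hx v hv
        exact h2 x (List.mem_cons_of_mem a hx) v hv

-- A's loop body, for an in-range index i, succeeds exactly for the unique strict minimum.
theorem pv_body (l : List Int) (i : Int) (hi0 : 0 ≤ i) (hi1 : i < (l.length : Int)) (v : Int) :
    ((if ((PySem.List.pyRange 0 (PySem.List.len l) 1).foldl
        (fun acc j => if PySem.List.pyGetD l i 0 < PySem.List.pyGetD l j 0 then acc + 1 else acc) (0 : Int))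
        = PySem.List.len l - 1 then some (PySem.List.pyGetD l i 0) else none) = some v)
    ↔ (v = l[i.toNat]'(by omega) ∧ (∀ y ∈ l, v ≤ y) ∧ l.count v = 1) := by
  have hget := PySem.List.pyGetD_eq_getElem l (i := i) 0 hi0 hi1
  rw [hget, pv_inner]
  have hvmem : l[i.toNat]'(by omega) ∈ l := List.getElem_mem _
  have hchar := pv_char l (l[i.toNat]'(by omega)) hvmem
  have hlen : PySem.List.len l = (l.length : Int) := by simp
  rw [hlen]
  constructor
  · intro h
    split_ifs at h with hc
    · have hv : v = l[i.toNat]'(by omega) := by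
        have := Option.some.inj h
        omega
      refine ⟨hv, ?_⟩
      rw [hv]
      exact hchar.mp hc
  · rintro ⟨hv, hrest⟩
    have hc := hchar.mpr (hv ▸ hrest)
    simp [hc, hv]

-- ===== VERDICT (by name: the statement is the Claim_ definition above) =====
theorem first_method_spec : Claim_equal_first_method := by
  intro l _
  show first_method l = first_method_alt l
  unfold first_method first_method_alt
  cases hm : PySem.List.min? l (fun x => x) with
  | none =>
    have hl : l = [] := (PySem.List.min?_eq_none_iff l _).mp hm
    subst hl
    simp [PySem.List.pyRange_one_eq_nil]
  | some m =>
    have hmem : m ∈ l := PySem.List.min?_mem hm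
    have hmin : ∀ y ∈ l, m ≤ y := by
      intro y hy; exact PySem.List.min?_isMin hm y hy
    by_cases hc : PySem.List.count l m = 1
    · show _ = if PySem.List.count l m = 1 then some m else none
      rw [if_pos hc]
      apply pv_findSome?_eq_some
      · obtain ⟨k, hk, hkv⟩ := List.mem_iff_getElem.mp hmem
        refine ⟨(k : Int), ?_, ?_⟩
        · rw [PySem.List.mem_pyRange_one]
          constructor
          · exact Int.natCast_nonneg k
          · simp; exact_mod_cast hk
        · intro hnone
          have hb := (pv_body l (k : Int) (Int.natCast_nonneg k) (by exact_mod_cast hk) m).mpr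
            ⟨by simp [hkv], hmin, by rw [← PySem.List.count_eq]; exact hc⟩
          simp only at hnone
          rw [hb] at hnone
          simp at hnone
      · intro i hi v hv
        rw [PySem.List.mem_pyRange_one] at hi
        obtain ⟨hi0, hi1⟩ := hi
        have hi1' : i < (l.length : Int) := by simpa using hi1
        simp only at hv
        have hb := (pv_body l i hi0 hi1' v).mp hv
        have hvmem : v ∈ l := by rw [hb.1]; exact List.getElem_mem _
        exact le_antisymm (hb.2.1 m hmem) (hmin v hvmem)
    · show _ = if PySem.List.count l m = 1 then some m else none
      rw [if_neg hc]
      rw [List.findSome?_eq_none_iff]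
      intro i hi
      rw [PySem.List.mem_pyRange_one] at hi
      obtain ⟨hi0, hi1⟩ := hi
      have hi1' : i < (l.length : Int) := by simpa using hi1
      simp only
      cases hfi : (if ((PySem.List.pyRange 0 (PySem.List.len l) 1).foldl
          (fun acc j => if PySem.List.pyGetD l i 0 < PySem.List.pyGetD l j 0 then acc + 1 else acc) (0 : Int))
          = PySem.List.len l - 1 then some (PySem.List.pyGetD l i 0) else none) with
      | none => rfl
      | some v =>
        exfalso
        have hb := (pv_body l i hi0 hi1' v).mp hfi
        have hvmem : v ∈ l := by rw [hb.1]; exact List.getElem_mem _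
        have : v = m := le_antisymm (hb.2.1 m hmem) (hmin v hvmem)
        apply hc
        rw [PySem.List.count_eq, ← this]
        exact hb.2.2
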